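-- pv_equiv track=rewrite | github.com/jasonlmagnus/sopra_steria | audit_tool/dashboard/components/metrics_calculator.py | _create_friendly_page_title
-- ===== SOURCE A (Python) =====
-- def _create_friendly_page_title(page_id: str, url: str) -> str:
--     """Create user-friendly page title"""
--     if not page_id:
--         return "Unknown Page"
--
--     title = page_id.replace('_', ' ').replace('-', ' ')
--     title = ' '.join(word.capitalize() for word in title.split())
--
--     if url:
--         lower_url = url.lower()
--         if 'newsroom' in lower_url:
--             title = f"Newsroom > {title}"
--         elif 'blog' in lower_url:
--             title = f"Blog > {title}"
--         elif 'about' in lower_url: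
--             title = f"About > {title}"
--         elif 'services' in lower_url:
--             title = f"Services > {title}"
--         elif 'industries' in lower_url:
--             title = f"Industries > {title}"
--         elif 'company' in lower_url:
--             title = f"Company > {title}"
--
--     return title
-- ===== SOURCE B (Python) =====
-- _PREFIXES = [
--     ('newsroom', 'Newsroom'),
--     ('blog', 'Blog'),
--     ('about', 'About'),
--     ('services', 'Services'),
--     ('industries', 'Industries'),
--     ('company', 'Company'),
-- ]
--
--
-- def _create_friendly_page_title(page_id: str, url: str) -> str:
--     """Create user-friendly page title"""
--     if not page_id:
--         return "Unknown Page"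
--
--     # single pass over page_id: a state machine that starts a new capitalized
--     # word after any separator ('_', '-' or whitespace) and lowercases the rest
--     chars = []
--     in_word = False
--     for ch in page_id:
--         if ch == '_' or ch == '-' or ch.isspace():
--             in_word = False
--         elif in_word:
--             chars.append(ch.lower())
--         else:
--             if chars:
--                 chars.append(' ')
--             chars.append(ch.upper())
--             in_word = True
--     title = ''.join(chars)
--
--     if url:
--         lower_url = url.lower()
--         prefix = next((p for k, p in _PREFIXES if k in lower_url), None)
--         if prefix is not None:
--             title = f"{prefix} > {title}"
--     return title
-- ===== Notes on version B (the rewrite author's own statement) =====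
-- stated objective: alternative
-- what changed: A's staged title pipeline (replace '_' and '-' with spaces, split on whitespace, capitalize each word, join with spaces) is replaced by a single-pass character state machine that emits the title directly, and the six-branch if/elif url chain by a first-match scan of an ordered (keyword, prefix) table.
import Mathlib
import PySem

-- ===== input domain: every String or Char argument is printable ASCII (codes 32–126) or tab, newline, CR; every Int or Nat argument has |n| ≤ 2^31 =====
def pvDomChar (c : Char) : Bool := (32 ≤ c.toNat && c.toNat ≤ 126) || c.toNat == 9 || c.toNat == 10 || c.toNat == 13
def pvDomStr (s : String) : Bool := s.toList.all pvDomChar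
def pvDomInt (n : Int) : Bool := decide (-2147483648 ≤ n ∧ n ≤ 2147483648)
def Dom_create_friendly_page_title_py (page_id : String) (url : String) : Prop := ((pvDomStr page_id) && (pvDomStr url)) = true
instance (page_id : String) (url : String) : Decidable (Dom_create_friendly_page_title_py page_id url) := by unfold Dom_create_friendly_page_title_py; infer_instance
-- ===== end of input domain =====

-- B replaces A's staged replace/split/capitalize/join title pipeline by a single-pass
-- character state machine, and the six-branch url if/elif chain by a first-match scan
-- of an ordered (keyword, prefix) table (objective: alternative).


-- ===== PORT A =====
-- str.capitalize(): first char uppercased, the rest lowercased (exact on the ASCII domain)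
def pyCapitalizeC (cs : List Char) : List Char :=
  match cs with
  | [] => []
  | c :: rest => PySem.Chars.upperChar c :: PySem.Chars.lower rest

-- title = ' '.join(word.capitalize() for word in page_id.replace('_',' ').replace('-',' ').split())
def pvBaseTitle (page_id : String) : String :=
  PySem.Str.join " "
    ((PySem.Str.split₀ (PySem.Str.replace (PySem.Str.replace page_id "_" " ") "-" " ")).map
      (fun w => String.ofList (pyCapitalizeC w.toList)))

def create_friendly_page_title_py (page_id : String) (url : String) : String :=
  if page_id = "" then "Unknown Page"
  else
    let title := pvBaseTitle page_id
    if url = "" then title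
    else
      let lower_url := PySem.Str.lower url
      if PySem.Str.isIn "newsroom" lower_url then "Newsroom > " ++ title
      else if PySem.Str.isIn "blog" lower_url then "Blog > " ++ title
      else if PySem.Str.isIn "about" lower_url then "About > " ++ title
      else if PySem.Str.isIn "services" lower_url then "Services > " ++ title
      else if PySem.Str.isIn "industries" lower_url then "Industries > " ++ title
      else if PySem.Str.isIn "company" lower_url then "Company > " ++ title
      else title

-- ===== PORT B =====
-- one step of B's state machine: state = (chars so far, currently inside a word?)
def pvStep (st : List Char × Bool) (c : Char) : List Char × Bool :=
  if c = '_' ∨ c = '-' ∨ PySem.Chars.isspace c then (st.1, false)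
  else if st.2 then (st.1 ++ [PySem.Chars.lowerChar c], true)
  else ((if st.1.isEmpty then st.1 else st.1 ++ [' ']) ++ [PySem.Chars.upperChar c], true)

-- title = ''.join(chars) after the single pass over page_id
def pvMachineTitle (page_id : String) : String :=
  String.ofList (page_id.toList.foldl pvStep ([], false)).1

def pvPrefixes : List (String × String) :=
  [("newsroom", "Newsroom"), ("blog", "Blog"), ("about", "About"),
   ("services", "Services"), ("industries", "Industries"), ("company", "Company")]

-- prefix = next((p for k, p in _PREFIXES if k in lower_url), None)
def pvFirstPrefix (lower_url : String) : List (String × String) → Option String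
  | [] => none
  | (kw, pre) :: rest =>
      if PySem.Str.isIn kw lower_url then some pre else pvFirstPrefix lower_url rest

def create_friendly_page_title_py_alt (page_id : String) (url : String) : String :=
  if page_id = "" then "Unknown Page"
  else
    let title := pvMachineTitle page_id
    if url = "" then title
    else
      match pvFirstPrefix (PySem.Str.lower url) pvPrefixes with
      | some pre => pre ++ " > " ++ title
      | none => title

-- ===== PRECONDITION & SPEC =====
def Spec_create_friendly_page_title_py (page_id : String) (url : String) (out : String) : Prop := out = create_friendly_page_title_py_alt page_id url
instance (page_id : String) (url : String) (out : String) : Decidable (Spec_create_friendly_page_title_py page_id url out) := by unfold Spec_create_friendly_page_title_py; infer_instance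

-- ===== CLAIM (what is proved, stated in full; the proofs are below) =====
def Claim_equal_create_friendly_page_title_py : Prop := ∀ (page_id : String) (url : String), Dom_create_friendly_page_title_py page_id url → Spec_create_friendly_page_title_py page_id url (create_friendly_page_title_py page_id url)

-- ===== LEMMAS AND PROOFS =====

-- the character substitution performed by the two replace calls
def pvSubst (c : Char) : Char :=
  if c = '_' then ' ' else if c = '-' then ' ' else c

lemma replace_single_go (a b : Char) (l : List Char) : ∀ (fuel : Nat) (acc : List Char),
    l.length ≤ fuel →
    PySem.Chars.replace.go [a] [b] fuel l acc
      = acc.reverse ++ l.map (fun c => if c = a then b else c) := by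
  induction l with
  | nil => intro fuel acc _; cases fuel <;> simp [PySem.Chars.replace.go]
  | cons c t ih =>
      intro fuel acc hf
      cases fuel with
      | zero => simp at hf
      | succ n =>
          simp only [PySem.Chars.replace.go]
          by_cases hca : c = a
          · subst hca
            have hp : [c].isPrefixOf (c :: t) = true := by simp [List.isPrefixOf]
            simp only [hp, if_true, List.length_cons, List.length_nil, Nat.zero_add,
              List.drop_succ_cons, List.drop_zero]
            rw [ih n _ (by simp at hf; omega)]
            simp
          · have hp : [a].isPrefixOf (c :: t) = false := by
              simp [List.isPrefixOf]; exact fun h => (hca h.symm).elim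
            simp only [hp, Bool.false_eq_true, if_false]
            rw [ih n _ (by simp at hf; omega)]
            simp [hca]

lemma replace_single (a b : Char) (cs : List Char) :
    PySem.Chars.replace cs [a] [b] = cs.map (fun c => if c = a then b else c) := by
  simp [PySem.Chars.replace, replace_single_go a b cs cs.length [] le_rfl]

lemma cap_ne_nil (w : List Char) (h : w ≠ []) : pyCapitalizeC w ≠ [] := by
  cases w with
  | nil => exact (h rfl).elim
  | cons c t => simp [pyCapitalizeC]

lemma cap_append_char (w : List Char) (h : w ≠ []) (c : Char) :
    pyCapitalizeC (w ++ [c]) = pyCapitalizeC w ++ [PySem.Chars.lowerChar c] := by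
  cases w with
  | nil => exact (h rfl).elim
  | cons d t => simp [pyCapitalizeC, PySem.Chars.lower]

-- ' '.join on a snoc list
lemma join_append_singleton (ws : List (List Char)) (w : List Char) :
    PySem.Chars.join [' '] (ws ++ [w])
      = if ws.isEmpty then w else PySem.Chars.join [' '] ws ++ ' ' :: w := by
  induction ws with
  | nil => simp [PySem.Chars.join, List.intercalate]
  | cons x xs ih =>
      cases xs with
      | nil => simp [PySem.Chars.join, List.intercalate]
      | cons y ys =>
          simp only [PySem.Chars.join, List.intercalate] at *
          simp [List.intersperse] at *
          simp [ih]

-- appending characters to the last word appends them to the join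
lemma join_snoc_append (A : List (List Char)) (u t : List Char) :
    PySem.Chars.join [' '] (A ++ [u ++ t]) = PySem.Chars.join [' '] (A ++ [u]) ++ t := by
  rw [join_append_singleton, join_append_singleton]
  cases A <;> simp

lemma join_ne_nil (ws : List (List Char)) (hne : ws ≠ []) (h : ∀ w ∈ ws, w ≠ []) :
    PySem.Chars.join [' '] ws ≠ [] := by
  induction ws using List.reverseRecOn with
  | nil => exact (hne rfl).elim
  | append_singleton xs x _ =>
      rw [join_append_singleton]
      cases xs with
      | nil => simpa using h x (by simp)
      | cons y ys => simp

-- main invariant: B's fold over the (already substituted) characters computes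
-- A's capitalize/join of split₀'s words
lemma machine_go (r : List Char) : ∀ (cur : List Char) (accW : List (List Char))
    (acc : List Char) (inW : Bool),
    (∀ c ∈ r, c ≠ '_' ∧ c ≠ '-') →
    inW = !cur.isEmpty →
    (∀ w ∈ accW, w ≠ []) →
    acc = PySem.Chars.join [' ']
        ((accW.reverse ++ (if cur.isEmpty then [] else [cur.reverse])).map pyCapitalizeC) →
    (r.foldl pvStep (acc, inW)).1
      = PySem.Chars.join [' '] ((PySem.Chars.split₀.go r cur accW).map pyCapitalizeC) := by
  induction r with
  | nil =>
      intro cur accW acc inW _ _ _ hacc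
      cases cur with
      | nil => simpa [PySem.Chars.split₀.go] using hacc
      | cons c t =>
          simp only [PySem.Chars.split₀.go, List.isEmpty_cons, Bool.false_eq_true, if_false]
          simpa using hacc
  | cons c rest ih =>
      intro cur accW acc inW hr hinW hW hacc
      have hrrest : ∀ c ∈ rest, c ≠ '_' ∧ c ≠ '-' := fun x hx => hr x (by simp [hx])
      have hcu : c ≠ '_' := (hr c (by simp)).1
      have hcm : c ≠ '-' := (hr c (by simp)).2
      by_cases hsp : PySem.Chars.isspace c = true
      · -- separator: close the current word (if any)
        have hstep : pvStep (acc, inW) c = (acc, false) := by simp [pvStep, hsp]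
        cases cur with
        | nil =>
            simp only [List.foldl_cons, hstep, PySem.Chars.split₀.go, hsp,
              List.isEmpty_nil, if_true]
            exact ih [] accW acc false hrrest (by simp) hW (by simpa using hacc)
        | cons d t =>
            simp only [List.foldl_cons, hstep, PySem.Chars.split₀.go, hsp,
              List.isEmpty_cons, Bool.false_eq_true, if_false, if_true]
            refine ih [] ((d :: t).reverse :: accW) acc false hrrest (by simp) ?_ ?_
            · intro w hw
              rcases List.mem_cons.mp hw with h | h
              · simp [h]
              · exact hW w h
            · simpa using hacc
      · -- word character
        have hcond : ¬ (c = '_' ∨ c = '-' ∨ PySem.Chars.isspace c) := by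
          rintro (h | h | h)
          · exact hcu h
          · exact hcm h
          · exact hsp h
        have hgo : PySem.Chars.split₀.go (c :: rest) cur accW
            = PySem.Chars.split₀.go rest (c :: cur) accW := by
          simp [PySem.Chars.split₀.go, hsp]
        rw [hgo]
        cases cur with
        | cons d t =>
            -- inside a word: append the lowercased character
            have hstep : pvStep (acc, inW) c
                = (acc ++ [PySem.Chars.lowerChar c], true) := by
              simp [pvStep, hcond, hinW]
            simp only [List.foldl_cons, hstep]
            refine ih (c :: d :: t) accW _ true hrrest (by simp) hW ?_
            simp only [List.isEmpty_cons, Bool.false_eq_true, if_false] at hacc ⊢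
            rw [hacc]
            have hrev : (c :: d :: t).reverse = (d :: t).reverse ++ [c] := by simp
            rw [hrev, List.map_append, List.map_append, List.map_cons, List.map_nil,
              List.map_cons, List.map_nil, cap_append_char ((d :: t).reverse) (by simp) c]
            exact (join_snoc_append _ _ _).symm
        | nil =>
            -- start a new word: separator space (if needed) + uppercased character
            have hstep : pvStep (acc, inW) c
                = ((if acc.isEmpty then acc else acc ++ [' '])
                    ++ [PySem.Chars.upperChar c], true) := by
              simp [pvStep, hcond, hinW]
            simp only [List.foldl_cons, hstep]
            refine ih [c] accW _ true hrrest (by simp) hW ?_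
            simp only [List.isEmpty_nil, if_true, List.append_nil] at hacc
            simp only [List.isEmpty_cons, Bool.false_eq_true, if_false,
              List.reverse_singleton, List.map_append, List.map_cons, List.map_nil]
            rw [join_append_singleton]
            have hcap : pyCapitalizeC [c] = [PySem.Chars.upperChar c] := by
              simp [pyCapitalizeC, PySem.Chars.lower]
            by_cases hA : accW = []
            · subst hA
              simp [hacc, PySem.Chars.join, List.intercalate, hcap]
            · have hAne : (accW.reverse.map pyCapitalizeC) ≠ [] := by
                simpa using hA
              have haccne : acc ≠ [] := by
                rw [hacc]
                exact join_ne_nil _ hAne (by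
                  intro w hw
                  rcases List.mem_map.mp hw with ⟨v, hv, hvw⟩
                  exact hvw ▸ cap_ne_nil v (hW v (List.mem_reverse.mp hv)))
              have hJ : PySem.Chars.join [' '] ((accW.map pyCapitalizeC).reverse) ≠ [] := by
                rw [← List.map_reverse]
                rw [hacc] at haccne
                exact haccne
              simp only [List.map_reverse, List.isEmpty_iff, hacc, hcap, if_neg hJ]
              rw [if_neg (by simpa [List.map_reverse] using hAne)]
              simp

lemma pvStep_subst (st : List Char × Bool) (c : Char) :
    pvStep st (pvSubst c) = pvStep st c := by
  by_cases h1 : c = '_'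
  · subst h1; simp [pvSubst, pvStep, PySem.Chars.isspace]
  · by_cases h2 : c = '-'
    · subst h2; simp [pvSubst, pvStep, PySem.Chars.isspace]
    · simp [pvSubst, h1, h2]

lemma subst_no_sep (cs : List Char) :
    ∀ c ∈ cs.map pvSubst, c ≠ '_' ∧ c ≠ '-' := by
  intro c hc
  rcases List.mem_map.mp hc with ⟨d, _, hdc⟩
  subst hdc
  unfold pvSubst
  split_ifs <;> simp_all

-- title equality: A's pipeline equals B's single-pass machine
lemma title_eq (pid : String) : pvBaseTitle pid = pvMachineTitle pid := by
  apply String.ext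
  have hsubst : (fun c => if c = '-' then ' ' else c) ∘ (fun c => if c = '_' then ' ' else c)
      = pvSubst := by
    funext c
    by_cases h1 : c = '_' <;> by_cases h2 : c = '-' <;> simp_all [pvSubst]
  have hrep : (PySem.Str.replace (PySem.Str.replace pid "_" " ") "-" " ").toList
      = pid.toList.map pvSubst :=
    calc (PySem.Str.replace (PySem.Str.replace pid "_" " ") "-" " ").toList
        = PySem.Chars.replace (PySem.Chars.replace pid.toList ['_'] [' ']) ['-'] [' '] := by
          simp only [PySem.Str.toList_replace]; rfl
      _ = pid.toList.map pvSubst := by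
          rw [replace_single, replace_single, List.map_map, hsubst]
  have hA : (pvBaseTitle pid).toList
      = PySem.Chars.join [' ']
          ((PySem.Chars.split₀ (pid.toList.map pvSubst)).map pyCapitalizeC) := by
    simp only [pvBaseTitle, PySem.Str.toList_join]
    have hsp : PySem.Chars.split₀ (pid.toList.map pvSubst)
        = (PySem.Str.split₀ (PySem.Str.replace (PySem.Str.replace pid "_" " ") "-" " ")).map
            String.toList := by
      rw [PySem.Str.split₀_map_toList, hrep]
    rw [hsp]
    simp only [List.map_map, Function.comp_def, String.toList_ofList]
    rfl
  have hB : (pvMachineTitle pid).toList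
      = PySem.Chars.join [' ']
          ((PySem.Chars.split₀ (pid.toList.map pvSubst)).map pyCapitalizeC) := by
    simp only [pvMachineTitle, String.toList_ofList]
    have hfold : (pid.toList.foldl pvStep ([], false)).1
        = ((pid.toList.map pvSubst).foldl pvStep ([], false)).1 := by
      rw [List.foldl_map]
      simp only [pvStep_subst]
    rw [hfold, PySem.Chars.split₀]
    exact machine_go (pid.toList.map pvSubst) [] [] [] false (subst_no_sep pid.toList)
      (by simp) (by simp) (by simp [PySem.Chars.join, List.intercalate])
  rw [hA, hB]

-- ===== VERDICT (by name: the statement is the Claim_ definition above) =====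
theorem create_friendly_page_title_py_spec : Claim_equal_create_friendly_page_title_py := by
  intro page_id url _
  unfold Spec_create_friendly_page_title_py
  by_cases hpid : page_id = ""
  · simp [create_friendly_page_title_py, create_friendly_page_title_py_alt, hpid]
  · by_cases hurl : url = ""
    · simp only [create_friendly_page_title_py, create_friendly_page_title_py_alt,
        hpid, hurl, if_false, ite_true]
      exact title_eq page_id
    · simp only [create_friendly_page_title_py, create_friendly_page_title_py_alt,
        hpid, hurl, if_false, pvFirstPrefix, pvPrefixes]
      split_ifs <;> (apply String.ext; simp [String.toList_append, title_eq])
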